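-- pv_equiv track=rewrite | github.com/RISKA667/Garmea | core/models.py | parse_prenoms
-- ===== SOURCE A (Python) =====
-- from typing import Optional, List, Dict
--
-- def parse_prenoms(full_prenoms: str) -> List[str]:
--     """Parse une chaîne de prénoms multiples"""
--     if not full_prenoms:
--         return []
--
--     # Séparer par espaces, en gardant les prénoms composés avec tiret
--     prenoms = []
--     words = full_prenoms.strip().split()
--
--     current_prenom = []
--     for word in words:
--         # Si le mot commence par une majuscule et qu'on a déjà un prénom en cours
--         # C'est un nouveau prénom
--         if word[0].isupper() and current_prenom and not word.startswith('-'):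
--             prenoms.append(' '.join(current_prenom))
--             current_prenom = [word]
--         else:
--             current_prenom.append(word)
--
--     # Ajouter le dernier prénom
--     if current_prenom:
--         prenoms.append(' '.join(current_prenom))
--
--     return prenoms
-- ===== SOURCE B (Python) =====
-- from typing import List
--
-- def parse_prenoms(full_prenoms: str) -> List[str]:
--     """Two-phase: build a table of name-start indices, then slice-and-join."""
--     words = full_prenoms.split()
--     if not words:
--         return []
--     bounds = [0] + [i for i in range(1, len(words))
--                     if words[i][0].isupper() and not words[i].startswith('-')]
--     ends = bounds[1:] + [len(words)]
--     return [' '.join(words[s:e]) for s, e in zip(bounds, ends)]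
-- ===== Notes on version B (the rewrite author's own statement) =====
-- stated objective: alternative
-- what changed: Replaces A's single scan with a running current-group buffer by a two-phase computation: first a table of name-start indices (0 plus every capitalized non-hyphen word position), then one pass over consecutive boundary pairs slicing and joining words[start:end].
import Mathlib
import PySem

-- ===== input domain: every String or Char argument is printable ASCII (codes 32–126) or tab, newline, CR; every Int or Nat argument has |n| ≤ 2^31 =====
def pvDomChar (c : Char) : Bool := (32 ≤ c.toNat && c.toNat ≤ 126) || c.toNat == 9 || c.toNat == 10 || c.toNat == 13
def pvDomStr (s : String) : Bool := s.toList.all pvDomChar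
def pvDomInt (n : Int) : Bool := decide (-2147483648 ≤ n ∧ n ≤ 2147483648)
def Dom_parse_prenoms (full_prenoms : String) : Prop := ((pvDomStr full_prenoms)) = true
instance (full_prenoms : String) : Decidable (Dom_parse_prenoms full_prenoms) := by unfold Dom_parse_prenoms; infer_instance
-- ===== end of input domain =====

-- B replaces A's running current-group buffer by a two-phase boundary-index table plus slice-and-join pass (alternative decomposition, same cost).

-- ===== PORT A =====
-- word[0] can never raise (split() yields nonempty words), so it is ported as pyGet? with elim false.
-- pvStepA is the literal loop body of A (state = (prenoms, current_prenom)).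
def pvStepA (st : List String × List String) (word : String) : List String × List String :=
  if ((PySem.Str.pyGet? word 0).elim false PySem.Chars.isupper) && !st.2.isEmpty
      && !(PySem.Str.startswith word "-") then
    (st.1 ++ [PySem.Str.join " " st.2], [word])
  else
    (st.1, st.2 ++ [word])

def parse_prenoms (full_prenoms : String) : List String :=
  if full_prenoms = "" then []
  else
    let words := PySem.Str.split₀ (PySem.Str.strip full_prenoms)
    let st := words.foldl pvStepA ([], [])
    if st.2.isEmpty then st.1 else st.1 ++ [PySem.Str.join " " st.2]

-- ===== PORT B =====
def parse_prenoms_alt (full_prenoms : String) : List String :=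
  let words := PySem.Str.split₀ full_prenoms
  if words.isEmpty then []
  else
    let bounds : List Int := 0 :: (PySem.List.pyRange 1 (words.length : Int) 1).filter
      (fun i => (PySem.List.pyGet? words i).elim false (fun w =>
        ((PySem.Str.pyGet? w 0).elim false PySem.Chars.isupper) && !(PySem.Str.startswith w "-")))
    let ends : List Int := bounds.tail ++ [(words.length : Int)]
    (bounds.zip ends).map (fun p => PySem.Str.join " " (PySem.List.slice words (some p.1) (some p.2)))

-- ===== PRECONDITION & SPEC =====
def Spec_parse_prenoms (full_prenoms : String) (out : List String) : Prop := out = parse_prenoms_alt full_prenoms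
instance (full_prenoms : String) (out : List String) : Decidable (Spec_parse_prenoms full_prenoms out) := by unfold Spec_parse_prenoms; infer_instance

-- ===== CLAIM (what is proved, stated in full; the proofs are below) =====
def Claim_equal_parse_prenoms : Prop := ∀ (full_prenoms : String), Dom_parse_prenoms full_prenoms → Spec_parse_prenoms full_prenoms (parse_prenoms full_prenoms)

-- ===== LEMMAS AND PROOFS =====

-- the shared word predicate: starts a new name
def pvPw (w : String) : Bool :=
  ((PySem.Str.pyGet? w 0).elim false PySem.Chars.isupper) && !(PySem.Str.startswith w "-")

-- abstract grouping: A's scan as structural recursion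
def pvGrp : List String → List String → List (List String)
  | cur, [] => [cur]
  | cur, w :: ws => if pvPw w then cur :: pvGrp [w] ws else pvGrp (cur ++ [w]) ws

-- boundary indices of the suffix ws (relative positions, 0-based)
def pvBIdx (ws : List String) : List Nat :=
  (List.range ws.length).filter (fun k => (ws[k]?).elim false pvPw)

-- segments after the first boundary
def pvTail (ws : List String) : List Nat → List String
  | [] => []
  | j :: rest => PySem.Str.join " " ((ws.drop j).take (rest.headD ws.length - j)) :: pvTail ws rest

def pvChunks (cur ws : List String) (idxs : List Nat) : List String :=
  match idxs with
  | [] => [PySem.Str.join " " (cur ++ ws)]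
  | j :: _ => PySem.Str.join " " (cur ++ ws.take j) :: pvTail ws idxs

-- ---- whitespace / split₀ lemmas: split(strip s) = split s ----
lemma pv_go_allspace (ws : List Char) (h : ∀ c ∈ ws, PySem.Chars.isspace c = true) :
    ∀ cur acc, PySem.Chars.split₀.go ws cur acc = PySem.Chars.split₀.go [] cur acc := by
  induction ws with
  | nil => intro cur acc; rfl
  | cons c ws ih =>
    intro cur acc
    have hc := h c (by simp)
    have hws : ∀ c ∈ ws, PySem.Chars.isspace c = true := fun c hm => h c (by simp [hm])
    simp only [PySem.Chars.split₀.go, hc]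
    by_cases hcur : cur.isEmpty
    · simp [hcur, ih hws, PySem.Chars.split₀.go]
    · simp [hcur, ih hws, PySem.Chars.split₀.go]

lemma pv_go_append_space (ws : List Char) (h : ∀ c ∈ ws, PySem.Chars.isspace c = true) :
    ∀ s cur acc, PySem.Chars.split₀.go (s ++ ws) cur acc = PySem.Chars.split₀.go s cur acc := by
  intro s
  induction s with
  | nil =>
    intro cur acc
    simpa using pv_go_allspace ws h cur acc
  | cons c s ih =>
    intro cur acc
    simp only [List.cons_append, PySem.Chars.split₀.go]
    by_cases hc : PySem.Chars.isspace c
    · by_cases hcur : cur.isEmpty <;> simp [hc, hcur, ih]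
    · simp [hc, ih]

lemma pv_go_lstrip (s : List Char) :
    ∀ acc, PySem.Chars.split₀.go (s.dropWhile PySem.Chars.isspace) [] acc = PySem.Chars.split₀.go s [] acc := by
  induction s with
  | nil => intro acc; rfl
  | cons c s ih =>
    intro acc
    by_cases hc : PySem.Chars.isspace c
    · rw [List.dropWhile_cons_of_pos (by simpa using hc)]
      simp [PySem.Chars.split₀.go, hc, ih]
    · rw [List.dropWhile_cons_of_neg (by simpa using hc)]

lemma pv_split₀_strip (cs : List Char) :
    PySem.Chars.split₀ (PySem.Chars.strip cs) = PySem.Chars.split₀ cs := by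
  unfold PySem.Chars.strip PySem.Chars.rstrip PySem.Chars.lstrip PySem.Chars.split₀
  set t := cs.dropWhile PySem.Chars.isspace with ht
  have hdec : t = (t.reverse.dropWhile PySem.Chars.isspace).reverse
      ++ (t.reverse.takeWhile PySem.Chars.isspace).reverse := by
    rw [← List.reverse_append, List.takeWhile_append_dropWhile, List.reverse_reverse]
  have hsp : ∀ c ∈ (t.reverse.takeWhile PySem.Chars.isspace).reverse, PySem.Chars.isspace c = true := by
    intro c hm
    exact List.mem_takeWhile_imp (by simpa using hm)
  calc PySem.Chars.split₀.go (t.reverse.dropWhile PySem.Chars.isspace).reverse [] []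
      = PySem.Chars.split₀.go ((t.reverse.dropWhile PySem.Chars.isspace).reverse
          ++ (t.reverse.takeWhile PySem.Chars.isspace).reverse) [] [] :=
        (pv_go_append_space _ hsp _ [] []).symm
    _ = PySem.Chars.split₀.go t [] [] := by rw [← hdec]
    _ = PySem.Chars.split₀.go cs [] [] := by rw [ht]; exact pv_go_lstrip cs []

lemma pv_str_split₀_strip (s : String) :
    PySem.Str.split₀ (PySem.Str.strip s) = PySem.Str.split₀ s := by
  rw [PySem.Str.split₀.eq_1, PySem.Str.split₀.eq_1]
  rw [show (PySem.Str.strip s).toList = PySem.Chars.strip s.toList from by simp,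
      pv_split₀_strip]

-- ---- A side: the fold computes pvGrp ----
lemma pv_A_fold (ws : List String) :
    ∀ (prenoms cur : List String), cur ≠ [] →
    (if (ws.foldl pvStepA (prenoms, cur)).2.isEmpty = true
     then (ws.foldl pvStepA (prenoms, cur)).1
     else (ws.foldl pvStepA (prenoms, cur)).1
       ++ [PySem.Str.join " " (ws.foldl pvStepA (prenoms, cur)).2])
    = prenoms ++ (pvGrp cur ws).map (PySem.Str.join " ") := by
  induction ws with
  | nil =>
    intro prenoms cur hcur
    simp [List.foldl, pvGrp, List.isEmpty_iff, hcur]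
  | cons w ws ih =>
    intro prenoms cur hcur
    have hne : cur.isEmpty = false := by simpa [List.isEmpty_iff] using hcur
    by_cases hp : pvPw w
    · have hcond : (((PySem.Str.pyGet? w 0).elim false PySem.Chars.isupper) && !cur.isEmpty
          && !(PySem.Str.startswith w "-")) = true := by
        have := hp; unfold pvPw at this
        simp only [Bool.and_eq_true] at this ⊢
        exact ⟨⟨this.1, by simp [hne]⟩, this.2⟩
      have hstep : pvStepA (prenoms, cur) w = (prenoms ++ [PySem.Str.join " " cur], [w]) := by
        unfold pvStepA; rw [if_pos hcond]
      rw [List.foldl_cons, hstep]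
      rw [ih (prenoms ++ [PySem.Str.join " " cur]) [w] (by simp)]
      simp [pvGrp, hp]
    · have hcond : (((PySem.Str.pyGet? w 0).elim false PySem.Chars.isupper) && !cur.isEmpty
          && !(PySem.Str.startswith w "-")) = false := by
        cases h1 : ((PySem.Str.pyGet? w 0).elim false PySem.Chars.isupper) with
        | false => simp
        | true =>
          have h2 : PySem.Str.startswith w "-" = true := by
            unfold pvPw at hp
            rw [h1] at hp
            simpa using hp
          rw [h2]; simp
      have hstep : pvStepA (prenoms, cur) w = (prenoms, cur ++ [w]) := by
        unfold pvStepA; rw [if_neg (by rw [hcond]; exact Bool.false_ne_true)]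
      rw [List.foldl_cons, hstep]
      rw [ih prenoms (cur ++ [w]) (by simp)]
      simp [pvGrp, hp]

-- ---- shift lemmas ----
lemma pv_tail_shift (w : String) (ws : List String) (idxs : List Nat) :
    pvTail (w :: ws) (idxs.map (· + 1)) = pvTail ws idxs := by
  induction idxs with
  | nil => rfl
  | cons j rest ih =>
    simp only [List.map_cons, pvTail, ih]
    congr 2
    cases rest <;> simp [Nat.add_sub_add_right]

lemma pv_chunks_shift (w : String) (cur ws : List String) (idxs : List Nat) :
    pvChunks cur (w :: ws) (idxs.map (· + 1)) = pvChunks (cur ++ [w]) ws idxs := by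
  cases idxs with
  | nil => simp [pvChunks]
  | cons j rest =>
    simp only [List.map_cons, pvChunks, List.take_succ_cons]
    rw [show (pvTail (w :: ws) ((j+1) :: rest.map (· + 1))
        = pvTail ws (j :: rest)) from by
      rw [show ((j+1) :: rest.map (· + 1)) = (j :: rest).map (· + 1) from by simp]
      exact pv_tail_shift w ws (j :: rest)]
    simp

lemma pv_tail_zero (w : String) (ws : List String) (idxs : List Nat) :
    pvTail (w :: ws) (0 :: idxs.map (· + 1)) = pvChunks [w] ws idxs := by
  cases idxs with
  | nil =>
    simp [pvTail, pvChunks]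
  | cons j rest =>
    have h1 : pvTail (w :: ws) (0 :: (j + 1) :: rest.map (· + 1))
        = PySem.Str.join " " ((w :: ws).take (j + 1))
          :: pvTail (w :: ws) ((j + 1) :: rest.map (· + 1)) := by
      simp [pvTail]
    simp only [List.map_cons]
    rw [h1, show ((j + 1) :: rest.map (· + 1)) = (j :: rest).map (· + 1) from by simp,
      pv_tail_shift]
    simp [pvChunks, List.take_succ_cons]

lemma pv_bidx_filter_shift (w : String) (ws : List String) (l : List Nat) :
    (l.map (· + 1)).filter (fun k => ((w :: ws)[k]?).elim false pvPw)
      = (l.filter (fun k => (ws[k]?).elim false pvPw)).map (· + 1) := by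
  induction l with
  | nil => rfl
  | cons a l ih =>
    simp only [List.map_cons, List.filter_cons]
    have hsh : (((w :: ws)[a + 1]?).elim false pvPw) = ((ws[a]?).elim false pvPw) := by
      simp [List.getElem?_cons_succ]
    rw [hsh]
    by_cases h : ((ws[a]?).elim false pvPw) = true
    · simp [h, ih]
    · simp only [Bool.not_eq_true] at h
      simp [h, ih]

lemma pv_bidx_cons (w : String) (ws : List String) :
    pvBIdx (w :: ws) = (if pvPw w then [0] else []) ++ (pvBIdx ws).map (· + 1) := by
  unfold pvBIdx
  rw [List.length_cons, List.range_succ_eq_map, List.filter_cons]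
  have h0 : (((w :: ws)[0]?).elim false pvPw) = pvPw w := by simp
  rw [h0]
  have hmap : (List.range ws.length).map Nat.succ = (List.range ws.length).map (· + 1) := by
    simp
  rw [hmap, pv_bidx_filter_shift]
  by_cases hp : pvPw w
  · simp [hp]
  · simp [hp]

-- ---- K: grouping equals boundary chunks ----
lemma pv_grp_chunks (ws : List String) :
    ∀ cur, (pvGrp cur ws).map (PySem.Str.join " ") = pvChunks cur ws (pvBIdx ws) := by
  induction ws with
  | nil =>
    intro cur
    simp [pvGrp, pvBIdx, pvChunks]
  | cons w ws ih =>
    intro cur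
    rw [pv_bidx_cons]
    by_cases hp : pvPw w
    · rw [show pvGrp cur (w :: ws) = cur :: pvGrp [w] ws from by simp [pvGrp, hp]]
      simp only [List.map_cons]
      rw [ih [w]]
      rw [show (if pvPw w then [0] else []) ++ (pvBIdx ws).map (· + 1)
          = 0 :: (pvBIdx ws).map (· + 1) from by simp [hp]]
      rw [show pvChunks cur (w :: ws) (0 :: (pvBIdx ws).map (· + 1))
          = PySem.Str.join " " cur :: pvTail (w :: ws) (0 :: (pvBIdx ws).map (· + 1)) from by
        simp [pvChunks]]
      rw [pv_tail_zero]
    · rw [show pvGrp cur (w :: ws) = pvGrp (cur ++ [w]) ws from by simp [pvGrp, hp]]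
      rw [ih (cur ++ [w])]
      rw [show (if pvPw w then [0] else []) ++ (pvBIdx ws).map (· + 1)
          = (pvBIdx ws).map (· + 1) from by simp [hp]]
      exact (pv_chunks_shift w cur ws (pvBIdx ws)).symm

-- ---- B side helpers ----
lemma pv_pyRange_one (n : Nat) :
    PySem.List.pyRange 1 ((n + 1 : Nat) : Int) 1 = (List.range n).map (fun k => ((k + 1 : Nat) : Int)) := by
  unfold PySem.List.pyRange
  have h1 : ((n + 1 : Nat) : Int) - 1 + 1 - 1 = (n : Int) := by push_cast; ring
  by_cases hn : n = 0
  · subst hn; simp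
  · have hlt : (1 : Int) < ((n + 1 : Nat) : Int) := by
      have : 1 ≤ n := Nat.one_le_iff_ne_zero.mpr hn
      push_cast; omega
    simp only [if_neg (by norm_num : ¬ (1:Int) = 0), if_pos (by norm_num : (0:Int) < 1), if_pos hlt]
    rw [show (((n + 1 : Nat) : Int) - 1 + 1 - 1) / 1 = (n : Int) from by rw [h1]; simp]
    simp [Int.toNat_natCast]
    intro k _
    omega

lemma pv_pyGet_shift (w : String) (ws : List String) (k : Nat) (hk : k < ws.length) :
    PySem.List.pyGet? (w :: ws) ((k + 1 : Nat) : Int) = some (ws[k]) := by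
  unfold PySem.List.pyGet? PySem.List.pyIdx?
  have h0 : (0 : Int) ≤ ((k + 1 : Nat) : Int) := by omega
  have h1 : ((k + 1 : Nat) : Int) < ((w :: ws).length : Int) := by
    simp only [List.length_cons]; omega
  rw [if_pos h0, if_pos h1]
  simp only [Int.toNat_natCast, Option.bind_some]
  simp [hk]

lemma pv_slice_nat (words : List String) (a b : Nat) (ha : a ≤ words.length) (hb : b ≤ words.length) :
    PySem.List.slice words (some ((a : Nat) : Int)) (some ((b : Nat) : Int)) = (words.drop a).take (b - a) := by
  unfold PySem.List.slice PySem.List.clampIdx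
  simp only [if_neg (by omega : ¬ ((a : Nat) : Int) < 0), if_neg (by omega : ¬ ((b : Nat) : Int) < 0)]
  rw [Int.toNat_natCast, Int.toNat_natCast, Nat.min_eq_left ha, Nat.min_eq_left hb]

-- zip-map over the boundary table equals pvTail
lemma pv_zip_tail (w : String) (ws : List String) :
    ∀ (j : Nat) (idxs : List Nat), j < ws.length → (∀ k ∈ idxs, k < ws.length) →
    (((((j + 1 : Nat) : Int) :: idxs.map (fun k => ((k + 1 : Nat) : Int))).zip
        ((idxs.map (fun k => ((k + 1 : Nat) : Int))) ++ [(((w :: ws).length : Nat) : Int)])).map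
      (fun p => PySem.Str.join " " (PySem.List.slice (w :: ws) (some p.1) (some p.2))))
    = pvTail ws (j :: idxs) := by
  intro j idxs
  induction idxs generalizing j with
  | nil =>
    intro hj _
    simp only [List.map_nil, List.nil_append, List.zip_cons_cons, List.zip_nil_left, List.map_cons,
      List.map_nil, pvTail]
    rw [pv_slice_nat (w :: ws) (j+1) (w :: ws).length (by simp; omega) (le_refl _)]
    simp only [List.headD_nil, List.drop_succ_cons]
    rw [List.take_of_length_le (by simp only [List.length_drop, List.length_cons]; omega),
      List.take_of_length_le (by simp only [List.length_drop]; omega)]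
  | cons k rest ih =>
    intro hj hmem
    have hk : k < ws.length := hmem k (by simp)
    have hrest : ∀ x ∈ rest, x < ws.length := fun x hx => hmem x (by simp [hx])
    simp only [List.map_cons, List.cons_append, List.zip_cons_cons, List.map_cons]
    rw [ih k hk hrest]
    simp only [pvTail, List.headD_cons]
    congr 2
    rw [pv_slice_nat (w :: ws) (j+1) (k+1) (by simp; omega) (by simp; omega)]
    rw [List.drop_succ_cons]
    congr 1
    omega

lemma pv_bidx_lt (ws : List String) : ∀ k ∈ pvBIdx ws, k < ws.length := by
  intro k hk
  unfold pvBIdx at hk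
  have := List.mem_of_mem_filter hk
  simpa using this

lemma pv_B_bounds (w : String) (ws : List String) :
    (PySem.List.pyRange 1 (((w :: ws).length : Nat) : Int) 1).filter
      (fun i => (PySem.List.pyGet? (w :: ws) i).elim false (fun x =>
        ((PySem.Str.pyGet? x 0).elim false PySem.Chars.isupper) && !(PySem.Str.startswith x "-")))
    = (pvBIdx ws).map (fun k => ((k + 1 : Nat) : Int)) := by
  rw [show (((w :: ws).length : Nat) : Int) = ((ws.length + 1 : Nat) : Int) from by simp]
  rw [pv_pyRange_one]
  rw [List.filter_map]
  unfold pvBIdx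
  congr 1
  apply List.filter_congr
  intro k hk
  simp only [List.mem_range] at hk
  simp only [Function.comp]
  rw [pv_pyGet_shift w ws k hk]
  simp [List.getElem?_eq_getElem hk, pvPw]

lemma pv_B_zip (w : String) (ws : List String) :
    (((0 : Int) :: (pvBIdx ws).map (fun k => ((k + 1 : Nat) : Int))).zip
      ((((0 : Int) :: (pvBIdx ws).map (fun k => ((k + 1 : Nat) : Int))).tail)
        ++ [(((w :: ws).length : Nat) : Int)])).map
      (fun p => PySem.Str.join " " (PySem.List.slice (w :: ws) (some p.1) (some p.2)))
    = pvChunks [w] ws (pvBIdx ws) := by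
  have hb := pv_bidx_lt ws
  cases hB : pvBIdx ws with
  | nil =>
    simp only [List.map_nil, List.tail_cons, List.nil_append, List.zip_cons_cons,
      List.zip_nil_left, List.map_cons, List.map_nil, pvChunks]
    rw [show (0 : Int) = ((0 : Nat) : Int) from rfl]
    rw [pv_slice_nat (w :: ws) 0 (w :: ws).length (by simp) (le_refl _)]
    simp
  | cons j rest =>
    have hj : j < ws.length := hb j (by rw [hB]; simp)
    have hrest : ∀ k ∈ rest, k < ws.length := fun k hk => hb k (by rw [hB]; simp [hk])
    simp only [List.map_cons, List.tail_cons, List.cons_append, List.zip_cons_cons, List.map_cons]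
    rw [pv_zip_tail w ws j rest hj hrest]
    simp only [pvChunks]
    congr 1
    rw [show (0 : Int) = ((0 : Nat) : Int) from rfl]
    rw [pv_slice_nat (w :: ws) 0 (j + 1) (by simp) (by simp; omega)]
    simp [List.take_succ_cons]

-- ===== VERDICT (by name: the statement is the Claim_ definition above) =====
theorem parse_prenoms_spec : Claim_equal_parse_prenoms := by
  intro s _
  unfold Spec_parse_prenoms parse_prenoms parse_prenoms_alt
  rw [pv_str_split₀_strip]
  by_cases hs : s = ""
  · subst hs
    rfl
  · rw [if_neg hs]
    cases hw : PySem.Str.split₀ s with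
    | nil => simp
    | cons w ws =>
      simp only [List.isEmpty_cons, Bool.false_eq_true, if_false]
      have hstep0 : pvStepA ([], []) w = ([], [w]) := by
        unfold pvStepA; simp
      calc (let st := (w :: ws).foldl pvStepA ([], []);
            if st.2.isEmpty then st.1 else st.1 ++ [PySem.Str.join " " st.2])
          = (if (ws.foldl pvStepA ([], [w])).2.isEmpty = true
             then (ws.foldl pvStepA ([], [w])).1
             else (ws.foldl pvStepA ([], [w])).1
               ++ [PySem.Str.join " " (ws.foldl pvStepA ([], [w])).2]) := by
            simp only [List.foldl_cons, hstep0]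
        _ = (pvGrp [w] ws).map (PySem.Str.join " ") := by
            simpa using pv_A_fold ws [] [w] (by simp)
        _ = pvChunks [w] ws (pvBIdx ws) := pv_grp_chunks ws [w]
        _ = _ := by
            rw [← pv_B_zip w ws, ← pv_B_bounds w ws]
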